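-- pv_equiv track=rewrite | github.com/LichiTI/lora-rescripts | mikazuki/utils/intel_xpu_guard.py | _pick_preferred_gpu_index
-- ===== SOURCE A (Python) =====
-- from typing import Any
--
-- def _pick_preferred_gpu_index(probe: dict[str, Any]) -> int:
--     gpu_names = [str(name or "").strip() for name in probe.get("gpu_names", [])]
--     gpu_memory_mb = [int(value or 0) for value in probe.get("gpu_memory_mb", [])]
--     if not gpu_names:
--         return 0
--
--     best_index = 0
--     best_score = (-1, -1)
--     for index, gpu_name in enumerate(gpu_names):
--         lowered = gpu_name.lower()
--         is_discrete = int(("arc" in lowered) or ("flex" in lowered) or ("b580" in lowered))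
--         memory_score = gpu_memory_mb[index] if index < len(gpu_memory_mb) else 0
--         score = (is_discrete, memory_score)
--         if score > best_score:
--             best_score = score
--             best_index = index
--     return best_index
-- ===== SOURCE B (Python) =====
-- def _pick_preferred_gpu_index(probe):
--     gpu_names = [str(name or "").strip() for name in probe.get("gpu_names", [])]
--     gpu_memory_mb = [int(value or 0) for value in probe.get("gpu_memory_mb", [])]
--     if not gpu_names:
--         return 0
--
--     def is_discrete(name):
--         lowered = name.lower()
--         return "arc" in lowered or "flex" in lowered or "b580" in lowered
--
--     def mem(i):
--         return gpu_memory_mb[i] if i < len(gpu_memory_mb) else 0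
--
--     discrete_indices = [i for i, name in enumerate(gpu_names) if is_discrete(name)]
--     candidates = discrete_indices or list(range(len(gpu_names)))
--     best = candidates[0]
--     for i in candidates[1:]:
--         if mem(i) > mem(best):
--             best = i
--     return best
-- ===== Notes on version B (the rewrite author's own statement) =====
-- stated objective: alternative
-- what changed: Replaces the single combined tuple-score scan with a filter-then-maximize decomposition: first collect the discrete GPU indices (falling back to all indices), then scan only those candidates for the first index with maximal memory.
import Mathlib
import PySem

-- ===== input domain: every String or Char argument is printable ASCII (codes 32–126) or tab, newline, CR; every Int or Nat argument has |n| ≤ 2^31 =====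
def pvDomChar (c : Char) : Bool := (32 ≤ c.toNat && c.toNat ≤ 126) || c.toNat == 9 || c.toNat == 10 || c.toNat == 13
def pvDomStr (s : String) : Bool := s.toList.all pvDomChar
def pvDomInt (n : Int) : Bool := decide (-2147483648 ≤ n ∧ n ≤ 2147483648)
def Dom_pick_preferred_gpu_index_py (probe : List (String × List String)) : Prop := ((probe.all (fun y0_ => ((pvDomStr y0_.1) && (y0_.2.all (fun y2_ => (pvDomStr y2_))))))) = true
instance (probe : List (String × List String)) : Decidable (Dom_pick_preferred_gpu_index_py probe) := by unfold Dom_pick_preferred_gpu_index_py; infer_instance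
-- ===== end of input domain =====

-- B replaces A's combined (discreteness, memory) tuple-score scan by a filter-then-maximize decomposition; objective: alternative (same cost).

-- ===== PORT A =====
-- shared by both Pythons verbatim: lowered = name.lower(); "arc" in lowered or "flex" in lowered or "b580" in lowered
def pvDiscrete (gpu_name : String) : Bool :=
  let lowered := PySem.Str.lower gpu_name
  PySem.Str.isIn "arc" lowered || PySem.Str.isIn "flex" lowered || PySem.Str.isIn "b580" lowered

-- shared by both Pythons verbatim: gpu_memory_mb[index] if index < len(gpu_memory_mb) else 0
def pvMemScore (gpu_memory_mb : List Int) (index : Int) : Int :=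
  if index < PySem.List.len gpu_memory_mb then PySem.List.pyGetD gpu_memory_mb index 0 else 0

-- A's loop over enumerate(gpu_names); state = (best_index, best_score)
def pvLoopA (gpu_memory_mb : List Int) (E : List (Int × String)) (st : Int × Int × Int) : Int × Int × Int :=
  E.foldl (fun st p =>
    let is_discrete : Int := if pvDiscrete p.2 then 1 else 0
    let memory_score := pvMemScore gpu_memory_mb p.1
    if is_discrete > st.2.1 ∨ (is_discrete = st.2.1 ∧ memory_score > st.2.2)
    then (p.1, is_discrete, memory_score) else st) st

def pick_preferred_gpu_index_py (probe : List (String × List String)) : Int :=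
  let gpu_names := (PySem.Dict.getD (PySem.Dict.mk probe) "gpu_names" []).map (fun name => PySem.Str.strip name)
  -- int(value or 0): "" gives 0, otherwise int(value); (ofStr? v).getD 0 is exact under Pre_ (ofStr? "" = none)
  let gpu_memory_mb := (PySem.Dict.getD (PySem.Dict.mk probe) "gpu_memory_mb" []).map (fun v => (PySem.Int.ofStr? v).getD 0)
  if gpu_names = [] then 0
  else (pvLoopA gpu_memory_mb (PySem.List.enumerate gpu_names 0) (0, -1, -1)).1

-- ===== PORT B =====
-- B's loop: best = candidates[0]; for i in candidates[1:]: if mem(i) > mem(best): best = i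
def pvLoopB (gpu_memory_mb : List Int) (candidates : List Int) (best : Int) : Int :=
  candidates.foldl (fun best i => if pvMemScore gpu_memory_mb i > pvMemScore gpu_memory_mb best then i else best) best

def pick_preferred_gpu_index_py_alt (probe : List (String × List String)) : Int :=
  let gpu_names := (PySem.Dict.getD (PySem.Dict.mk probe) "gpu_names" []).map (fun name => PySem.Str.strip name)
  let gpu_memory_mb := (PySem.Dict.getD (PySem.Dict.mk probe) "gpu_memory_mb" []).map (fun v => (PySem.Int.ofStr? v).getD 0)
  if gpu_names = [] then 0
  else
    let discrete_indices := ((PySem.List.enumerate gpu_names 0).filter (fun p => pvDiscrete p.2)).map (fun p => p.1)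
    let candidates := if discrete_indices = [] then PySem.List.pyRange 0 (PySem.List.len gpu_names) 1 else discrete_indices
    match candidates with
    | [] => 0   -- unreachable: candidates is nonempty when gpu_names is
    | c :: cs => pvLoopB gpu_memory_mb cs c

-- ===== PRECONDITION & SPEC =====
-- Pre_ excludes exactly the inputs where Python A raises ValueError: a nonempty "gpu_memory_mb" entry that int() cannot parse.
def Pre_pick_preferred_gpu_index_py (probe : List (String × List String)) : Prop :=
  ∀ v ∈ PySem.Dict.getD (PySem.Dict.mk probe) "gpu_memory_mb" [], v = "" ∨ (PySem.Int.ofStr? v).isSome = true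
instance (probe : List (String × List String)) : Decidable (Pre_pick_preferred_gpu_index_py probe) := by unfold Pre_pick_preferred_gpu_index_py; infer_instance

def pvWitness_pick_preferred_gpu_index_py : (List (String × List String)) :=
  [("gpu_names", ["Intel Arc A770", "Intel UHD Graphics"]), ("gpu_memory_mb", ["16384", "2048"])]

def Spec_pick_preferred_gpu_index_py (probe : List (String × List String)) (out : Int) : Prop := out = pick_preferred_gpu_index_py_alt probe
instance (probe : List (String × List String)) (out : Int) : Decidable (Spec_pick_preferred_gpu_index_py probe out) := by unfold Spec_pick_preferred_gpu_index_py; infer_instance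

-- ===== CLAIM (what is proved, stated in full; the proofs are below) =====
def Claim_equal_pick_preferred_gpu_index_py : Prop := ∀ (probe : List (String × List String)), Dom_pick_preferred_gpu_index_py probe → Pre_pick_preferred_gpu_index_py probe → Spec_pick_preferred_gpu_index_py probe (pick_preferred_gpu_index_py probe)

-- ===== LEMMAS AND PROOFS =====

-- the selection A's loop performs, as a recursion carrying the current best pair
def pvPick (mems : List Int) : (Int × String) → List (Int × String) → Int × String
  | p, [] => p
  | p, q :: E =>
      if (if pvDiscrete q.2 then (1:Int) else 0) > (if pvDiscrete p.2 then (1:Int) else 0)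
         ∨ ((if pvDiscrete q.2 then (1:Int) else 0) = (if pvDiscrete p.2 then (1:Int) else 0)
            ∧ pvMemScore mems q.1 > pvMemScore mems p.1)
      then pvPick mems q E else pvPick mems p E

lemma pvLoopA_cons (mems : List Int) (q : Int × String) (E : List (Int × String)) (st : Int × Int × Int) :
    pvLoopA mems (q :: E) st =
      pvLoopA mems E
        (if (if pvDiscrete q.2 then (1:Int) else 0) > st.2.1
            ∨ ((if pvDiscrete q.2 then (1:Int) else 0) = st.2.1 ∧ pvMemScore mems q.1 > st.2.2)
         then (q.1, (if pvDiscrete q.2 then (1:Int) else 0), pvMemScore mems q.1) else st) := rfl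

lemma pvLoopB_cons (mems : List Int) (i : Int) (C : List Int) (b : Int) :
    pvLoopB mems (i :: C) b = pvLoopB mems C (if pvMemScore mems i > pvMemScore mems b then i else b) := rfl

lemma pvLoopA_eq_pick (mems : List Int) (E : List (Int × String)) : ∀ p : Int × String,
    pvLoopA mems E (p.1, (if pvDiscrete p.2 then (1:Int) else 0), pvMemScore mems p.1)
      = ((pvPick mems p E).1, (if pvDiscrete (pvPick mems p E).2 then (1:Int) else 0),
          pvMemScore mems (pvPick mems p E).1) := by
  induction E with
  | nil => intro p; simp [pvLoopA, pvPick]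
  | cons q E ih =>
      intro p
      rw [pvLoopA_cons, pvPick]
      by_cases hc : (if pvDiscrete q.2 then (1:Int) else 0) > (if pvDiscrete p.2 then (1:Int) else 0)
         ∨ ((if pvDiscrete q.2 then (1:Int) else 0) = (if pvDiscrete p.2 then (1:Int) else 0)
            ∧ pvMemScore mems q.1 > pvMemScore mems p.1)
      · rw [if_pos hc, if_pos hc]; exact ih q
      · rw [if_neg hc, if_neg hc]; exact ih p

lemma pvPick_disc (mems : List Int) (E : List (Int × String)) : ∀ p : Int × String, pvDiscrete p.2 = true →
    (pvPick mems p E).1 = pvLoopB mems ((E.filter (fun q => pvDiscrete q.2)).map (fun q => q.1)) p.1 := by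
  induction E with
  | nil => intro p _; simp [pvPick, pvLoopB]
  | cons q E ih =>
      intro p hp
      by_cases hq : pvDiscrete q.2 = true
      · rw [pvPick]
        simp only [hp, hq, if_true]
        rw [List.filter_cons_of_pos (by simpa using hq), List.map_cons, pvLoopB_cons]
        by_cases hm : pvMemScore mems q.1 > pvMemScore mems p.1
        · rw [if_pos (by simp [hm]), if_pos hm]; exact ih q hq
        · rw [if_neg (by simp [hm]), if_neg hm]; exact ih p hp
      · rw [pvPick]
        rw [if_neg (by simp [hq, hp])]
        rw [List.filter_cons_of_neg (by simpa using hq)]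
        exact ih p hp
  
lemma pvPick_nodisc (mems : List Int) (E : List (Int × String)) : ∀ p : Int × String, pvDiscrete p.2 = false →
    E.filter (fun q => pvDiscrete q.2) = [] →
    (pvPick mems p E).1 = pvLoopB mems (E.map (fun q => q.1)) p.1 := by
  induction E with
  | nil => intro p _ _; simp [pvPick, pvLoopB]
  | cons q E ih =>
      intro p hp hf
      have hq : pvDiscrete q.2 = false := by
        by_contra h
        rw [List.filter_cons_of_pos (by simpa using (Bool.of_not_eq_false h))] at hf
        exact List.cons_ne_nil _ _ hf
      rw [List.filter_cons_of_neg (by simp [hq])] at hf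
      rw [pvPick, List.map_cons, pvLoopB_cons]
      simp only [hp, hq]
      by_cases hm : pvMemScore mems q.1 > pvMemScore mems p.1
      · rw [if_pos (by simp [hm]), if_pos hm]; exact ih q hq hf
      · rw [if_neg (by simp [hm]), if_neg hm]; exact ih p hp hf

lemma pvPick_first_disc (mems : List Int) (E : List (Int × String)) :
    ∀ (p : Int × String) (c : Int) (cs : List Int), pvDiscrete p.2 = false →
    (E.filter (fun q => pvDiscrete q.2)).map (fun q => q.1) = c :: cs →
    (pvPick mems p E).1 = pvLoopB mems cs c := by
  induction E with
  | nil => intro p c cs _ h; simp at h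
  | cons q E ih =>
      intro p c cs hp hf
      by_cases hq : pvDiscrete q.2 = true
      · rw [List.filter_cons_of_pos (by simpa using hq), List.map_cons] at hf
        injection hf with hc hcs
        rw [pvPick]
        rw [if_pos (by simp [hp, hq])]
        rw [pvPick_disc mems E q hq, hcs, hc]
      · have hq' : pvDiscrete q.2 = false := Bool.eq_false_iff.mpr (fun h => hq h)
        rw [List.filter_cons_of_neg (by simp [hq'])] at hf
        rw [pvPick]; simp only [hp, hq']
        by_cases hm : pvMemScore mems q.1 > pvMemScore mems p.1
        · rw [if_pos (by simp [hm])]; exact ih q c cs hq' hf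
        · rw [if_neg (by simp [hm])]; exact ih p c cs hp hf

lemma pvCore (mems : List Int) (nm : String) (rest : List String) :
    (pvLoopA mems (PySem.List.enumerate (nm :: rest) 0) (0, -1, -1)).1 =
    (let discrete_indices := ((PySem.List.enumerate (nm :: rest) 0).filter (fun p => pvDiscrete p.2)).map (fun p => p.1)
     let candidates := if discrete_indices = [] then PySem.List.pyRange 0 (PySem.List.len (nm :: rest)) 1 else discrete_indices
     match candidates with
     | [] => (0:Int)
     | c :: cs => pvLoopB mems cs c) := by
  simp only []
  rw [PySem.List.enumerate_cons]
  simp only [zero_add]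
  rw [pvLoopA_cons, if_pos (Or.inl (by split_ifs <;> norm_num))]
  have hA : (pvLoopA mems (PySem.List.enumerate rest 1)
      (((0:Int), nm).1, (if pvDiscrete ((0:Int), nm).2 then (1:Int) else 0),
        pvMemScore mems ((0:Int), nm).1)).1
      = (pvPick mems ((0:Int), nm) (PySem.List.enumerate rest 1)).1 := by
    rw [pvLoopA_eq_pick]
  rw [hA]
  by_cases hd : pvDiscrete nm = true
  · rw [List.filter_cons_of_pos (by simpa using hd), List.map_cons]
    simp only [List.cons_ne_nil]
    exact pvPick_disc mems (PySem.List.enumerate rest 1) ((0:Int), nm) hd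
  · have hd' : pvDiscrete ((0:Int), nm).2 = false := Bool.eq_false_iff.mpr (fun h => hd h)
    rw [List.filter_cons_of_neg (by simpa using hd')]
    cases hfd : ((PySem.List.enumerate rest 1).filter (fun p => pvDiscrete p.2)).map (fun p => p.1) with
    | nil =>
        have hfe : (PySem.List.enumerate rest 1).filter (fun p => pvDiscrete p.2) = [] :=
          List.map_eq_nil_iff.mp hfd
        rw [if_pos rfl]
        have hlen : PySem.List.len (nm :: rest) = 1 + (rest.length : Int) := by
          simp [PySem.List.len_eq]; omega
        rw [hlen, PySem.List.pyRange_one_cons (by omega)]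
        have := pvPick_nodisc mems (PySem.List.enumerate rest 1) ((0:Int), nm) hd' hfe
        rw [this, PySem.List.map_fst_enumerate]
        norm_num
    | cons c cs =>
        rw [if_neg (List.cons_ne_nil c cs)]
        exact pvPick_first_disc mems (PySem.List.enumerate rest 1) ((0:Int), nm) c cs hd' hfd

-- ===== VERDICT (by name: the statement is the Claim_ definition above) =====
theorem pick_preferred_gpu_index_py_spec : Claim_equal_pick_preferred_gpu_index_py := by
  intro probe _ _
  unfold Spec_pick_preferred_gpu_index_py pick_preferred_gpu_index_py pick_preferred_gpu_index_py_alt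
  cases h : (PySem.Dict.getD (PySem.Dict.mk probe) "gpu_names" []).map (fun name => PySem.Str.strip name) with
  | nil => simp
  | cons nm rest =>
      simp only [List.cons_ne_nil, ite_false]
      exact pvCore _ nm rest
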